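-- pv_equiv track=rewrite | github.com/Whitthenstein/Advent_of_Code-Solutions | Solutions/2015/python/day_11.py | twoDifferentPairsOfLetters
-- ===== SOURCE A (Python) =====
-- def twoDifferentPairsOfLetters(password: str):
--     firstPairLetter = ""
--     pairsFound = 0
--     for i in range(len(password) - 1):
--         if password[i] == password[i+1] and firstPairLetter != password[i]:
--             if firstPairLetter == "":
--                 firstPairLetter = password[i]
--             pairsFound += 1
--         if pairsFound == 2:
--             return True
--
--     return False
-- ===== SOURCE B (Python) =====
-- def twoDifferentPairsOfLetters(password: str):
--     pairLetters = {password[i] for i in range(len(password) - 1)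
--                    if password[i] == password[i + 1]}
--     return len(pairLetters) >= 2
-- ===== Notes on version B (the rewrite author's own statement) =====
-- stated objective: simpler
-- what changed: Replaces the sentinel/counter/early-return state machine with a set comprehension collecting the distinct letters forming adjacent equal pairs and a final cardinality test len(set) >= 2.
import Mathlib
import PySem

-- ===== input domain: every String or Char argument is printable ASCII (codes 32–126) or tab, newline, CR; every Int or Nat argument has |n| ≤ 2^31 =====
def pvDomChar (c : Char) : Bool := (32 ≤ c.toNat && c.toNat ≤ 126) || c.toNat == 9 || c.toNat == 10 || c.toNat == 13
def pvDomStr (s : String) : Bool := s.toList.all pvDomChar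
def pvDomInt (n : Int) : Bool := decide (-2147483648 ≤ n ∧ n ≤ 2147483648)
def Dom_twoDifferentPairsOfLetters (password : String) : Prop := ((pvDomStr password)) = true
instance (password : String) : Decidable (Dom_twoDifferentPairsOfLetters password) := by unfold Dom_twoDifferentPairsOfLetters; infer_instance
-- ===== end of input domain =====

-- B replaces A's sentinel/counter/early-return state machine by collecting the set of
-- distinct letters forming adjacent equal pairs and testing its cardinality (objective: simpler).

-- ===== PORT A =====
-- A's loop over i in range(len(password)-1) becomes the obvious recursion over the
-- character list, visiting each adjacent pair (password[i], password[i+1]) with the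
-- same state (firstPairLetter, pairsFound) and the same early return on pairsFound == 2.
-- firstPairLetter only ever holds "" or a one-character string password[i], so it is
-- ported exactly as Option Char: "" = none, the letter a = some a; the comparisons
-- firstPairLetter != password[i] and firstPairLetter == "" become first ≠ some c1 and
-- first = none.
def pvLoopA (cs : List Char) (first : Option Char) (count : Int) : Bool :=
  match cs with
  | c1 :: c2 :: rest =>
    if c1 = c2 ∧ first ≠ some c1 then
      let first' := if first = none then some c1 else first
      let count' := count + 1
      if count' = 2 then true else pvLoopA (c2 :: rest) first' count'
    else
      if count = 2 then true else pvLoopA (c2 :: rest) first count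
  | _ => false
termination_by cs.length

def twoDifferentPairsOfLetters (password : String) : Bool :=
  pvLoopA password.toList none 0
-- ===== PORT B =====
-- the generator of B's set comprehension: password[i] for each i with password[i] == password[i+1]
def pvPairLetters (cs : List Char) : List Char :=
  match cs with
  | c1 :: c2 :: rest => (if c1 = c2 then [c1] else []) ++ pvPairLetters (c2 :: rest)
  | _ => []
termination_by cs.length

def twoDifferentPairsOfLetters_alt (password : String) : Bool :=
  decide (2 ≤ (PySem.Set.ofList (pvPairLetters password.toList)).length)

-- ===== PRECONDITION & SPEC =====
def Spec_twoDifferentPairsOfLetters (password : String) (out : Bool) : Prop := out = twoDifferentPairsOfLetters_alt password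
instance (password : String) (out : Bool) : Decidable (Spec_twoDifferentPairsOfLetters password out) := by unfold Spec_twoDifferentPairsOfLetters; infer_instance

-- ===== CLAIM (what is proved, stated in full; the proofs are below) =====
def Claim_equal_twoDifferentPairsOfLetters : Prop := ∀ (password : String), Dom_twoDifferentPairsOfLetters password → Spec_twoDifferentPairsOfLetters password (twoDifferentPairsOfLetters password)

-- ===== LEMMAS AND PROOFS =====

-- cardinality of the pair-letter set: ≥ 2 iff some collected letter differs from the head
lemma pv_two_le_ofList_cons (x : Char) (l : List Char) :
    2 ≤ (PySem.Set.ofList (x :: l)).length ↔ ∃ c ∈ l, c ≠ x := by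
  rw [PySem.Set.ofList_cons]
  constructor
  · intro h
    rcases hd : PySem.Set.discard (PySem.Set.ofList l) x with _ | ⟨y, t⟩
    · simp [hd] at h
    · have hy : y ∈ PySem.Set.discard (PySem.Set.ofList l) x := by simp [hd]
      rw [PySem.Set.mem_discard] at hy
      exact ⟨y, (PySem.Set.mem_ofList l y).1 hy.1, hy.2⟩
  · rintro ⟨c, hc, hne⟩
    have hm : c ∈ PySem.Set.discard (PySem.Set.ofList l) x :=
      (PySem.Set.mem_discard _ _ _).2 ⟨(PySem.Set.mem_ofList l c).2 hc, hne⟩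
    have hlen : 1 ≤ (PySem.Set.discard (PySem.Set.ofList l) x).length :=
      List.length_pos_of_mem hm
    simp only [List.length_cons]
    omega

-- state some a = current firstPairLetter (one counted pair so far): the loop returns
-- true iff a later pair letter differs from a
lemma pvLoopA_one (cs : List Char) (a : Char) :
    pvLoopA cs (some a) 1 = decide (∃ c ∈ pvPairLetters cs, c ≠ a) := by
  match cs with
  | [] => simp [pvLoopA, pvPairLetters]
  | [c] => simp [pvLoopA, pvPairLetters]
  | c1 :: c2 :: rest =>
    rw [pvLoopA, pvPairLetters]
    by_cases h12 : c1 = c2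
    · by_cases hne : a = c1
      · subst hne
        rw [if_neg (by simp)]
        rw [if_neg (by decide), pvLoopA_one (c2 :: rest) a]
        simp [h12]
      · rw [if_pos ⟨h12, by simpa using hne⟩]
        rw [if_neg (by simp : ¬ ((some a : Option Char) = none)),
          if_pos (by decide : (1:Int) + 1 = 2)]
        exact (decide_eq_true ⟨c1, by simp [h12], fun h => hne h.symm⟩).symm
    · rw [if_neg (by intro h; exact h12 h.1), if_neg (by decide), pvLoopA_one (c2 :: rest) a]
      simp [h12]
termination_by cs.length

-- initial state: the loop from ("", 0) returns true iff the pair-letter set has ≥ 2 elements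
lemma pvLoopA_zero (cs : List Char) :
    pvLoopA cs none 0 = decide (2 ≤ (PySem.Set.ofList (pvPairLetters cs)).length) := by
  match cs with
  | [] => simp [pvLoopA, pvPairLetters, PySem.Set.ofList]
  | [c] => simp [pvLoopA, pvPairLetters, PySem.Set.ofList]
  | c1 :: c2 :: rest =>
    rw [pvLoopA, pvPairLetters]
    by_cases h12 : c1 = c2
    · rw [if_pos ⟨h12, by simp⟩, if_pos rfl, if_neg (by decide : ¬ ((0:Int) + 1 = 2))]
      rw [show (0:Int) + 1 = 1 from by decide, pvLoopA_one (c2 :: rest) c1]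
      have heq : (if c1 = c2 then [c1] else []) ++ pvPairLetters (c2 :: rest)
          = c1 :: pvPairLetters (c2 :: rest) := by simp [h12]
      rw [heq, decide_eq_decide.2 (pv_two_le_ofList_cons c1 (pvPairLetters (c2 :: rest)))]
    · rw [if_neg (by intro h; exact h12 h.1), if_neg (by decide), pvLoopA_zero (c2 :: rest)]
      simp [h12]
termination_by cs.length

-- ===== VERDICT (by name: the statement is the Claim_ definition above) =====
theorem twoDifferentPairsOfLetters_spec : Claim_equal_twoDifferentPairsOfLetters := by
  intro password _
  unfold Spec_twoDifferentPairsOfLetters twoDifferentPairsOfLetters twoDifferentPairsOfLetters_alt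
  exact pvLoopA_zero password.toList
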